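-- pv_equiv track=rewrite | github.com/GitAthisruth/leetcode_practice | leet_code/fibonacci_last_digit_of_sum_of_square.py | fibonacci_last_digit
-- ===== SOURCE A (Python) =====
-- def fibonacci_last_digit(n):
--     n = n % 60  # Pisano period
--     if n <= 1:
--         return n
--     a, b = 0, 1
--     for _ in range(n - 1):
--         a, b = b, (a + b)%10
--     return (b*(a+b)%10)%10
-- ===== SOURCE B (Python) =====
-- def fibonacci_last_digit(n):
--     # Precompute, for every residue m of the Pisano period of 10, the last
--     # digit of F(0)^2 + ... + F(m)^2 (= F(m)*F(m+1)); answer by table lookup.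
--     table = []
--     total = 0
--     a, b = 0, 1
--     for _ in range(60):
--         total = (total + a * a) % 10
--         a, b = b, (a + b) % 10
--         table.append(total)
--     return table[n % 60]
-- ===== Notes on version B (the rewrite author's own statement) =====
-- stated objective: alternative
-- what changed: B precomputes a per-residue lookup table of last digits of the running sum of squared Fibonacci numbers over one Pisano period and answers by indexing it with the reduced residue, instead of A's on-demand loop with the product identity F(n)*F(n+1).
import Mathlib
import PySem

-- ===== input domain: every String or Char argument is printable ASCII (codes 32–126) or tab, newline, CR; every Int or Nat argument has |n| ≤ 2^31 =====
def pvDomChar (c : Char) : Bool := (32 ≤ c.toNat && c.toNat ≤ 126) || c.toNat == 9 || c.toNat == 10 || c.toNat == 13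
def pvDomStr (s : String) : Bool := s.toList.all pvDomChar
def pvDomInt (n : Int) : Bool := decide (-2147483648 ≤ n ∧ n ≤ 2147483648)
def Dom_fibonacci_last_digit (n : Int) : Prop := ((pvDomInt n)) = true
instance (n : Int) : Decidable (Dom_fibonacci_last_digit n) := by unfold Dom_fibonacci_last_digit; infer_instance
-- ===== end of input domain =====

-- B precomputes a per-residue table of last digits of the running sum of squared Fibonacci numbers over one Pisano period and answers by a single table lookup, instead of A's on-demand loop with the product identity F(n)*F(n+1).

-- ===== PORT A =====
def fibonacci_last_digit (n : Int) : Int :=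
  let m := PySem.Int.mod n 60
  if m ≤ 1 then m
  else
    let p := (PySem.List.pyRange 0 (m - 1) 1).foldl
      (fun (p : Int × Int) _ => (p.2, PySem.Int.mod (p.1 + p.2) 10)) (0, 1)
    PySem.Int.mod (PySem.Int.mod (p.2 * (p.1 + p.2)) 10) 10

-- ===== PORT B =====
-- state: (table, total, a, b); the looked-up index is always valid (one table entry per residue), so getD's default is never used
def fibonacci_last_digit_alt (n : Int) : Int :=
  let st := (PySem.List.pyRange 0 60 1).foldl
    (fun (st : List Int × Int × Int × Int) _ =>
      let total' := PySem.Int.mod (st.2.1 + st.2.2.1 * st.2.2.1) 10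
      (st.1 ++ [total'], total', st.2.2.2, PySem.Int.mod (st.2.2.1 + st.2.2.2) 10))
    ([], 0, 0, 1)
  (PySem.List.pyGet? st.1 (PySem.Int.mod n 60)).getD 0

-- ===== PRECONDITION & SPEC =====
def Spec_fibonacci_last_digit (n : Int) (out : Int) : Prop := out = fibonacci_last_digit_alt n
instance (n : Int) (out : Int) : Decidable (Spec_fibonacci_last_digit n out) := by unfold Spec_fibonacci_last_digit; infer_instance

-- ===== CLAIM (what is proved, stated in full; the proofs are below) =====
def Claim_equal_fibonacci_last_digit : Prop := ∀ (n : Int), Dom_fibonacci_last_digit n → Spec_fibonacci_last_digit n (fibonacci_last_digit n)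

-- ===== LEMMAS AND PROOFS =====
theorem pv_mod60_idem (n : Int) :
    PySem.Int.mod (PySem.Int.mod n 60) 60 = PySem.Int.mod n 60 := by
  simp only [PySem.Int.mod_eq_emod_of_pos (show (0:Int) < 60 by norm_num)]
  exact Int.emod_emod_of_dvd n (by norm_num)

theorem pv_A_reduce (n : Int) :
    fibonacci_last_digit n = fibonacci_last_digit (PySem.Int.mod n 60) := by
  simp only [fibonacci_last_digit, pv_mod60_idem]

theorem pv_B_reduce (n : Int) :
    fibonacci_last_digit_alt n = fibonacci_last_digit_alt (PySem.Int.mod n 60) := by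
  simp only [fibonacci_last_digit_alt, pv_mod60_idem]

set_option maxRecDepth 4000 in
theorem pv_core : ∀ k : Nat, k < 60 →
    fibonacci_last_digit (k : Int) = fibonacci_last_digit_alt (k : Int) := by decide

-- ===== VERDICT (by name: the statement is the Claim_ definition above) =====
theorem fibonacci_last_digit_spec : Claim_equal_fibonacci_last_digit := by
  intro n _
  unfold Spec_fibonacci_last_digit
  rw [pv_A_reduce, pv_B_reduce]
  have hpos : (0:Int) < 60 := by norm_num
  have hm : PySem.Int.mod n 60 = n % 60 := PySem.Int.mod_eq_emod_of_pos hpos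
  have h0 : 0 ≤ n % 60 := Int.emod_nonneg n (by norm_num)
  have h1 : n % 60 < 60 := Int.emod_lt_of_pos n hpos
  obtain ⟨k, hk⟩ : ∃ k : Nat, n % 60 = (k : Int) := ⟨(n % 60).toNat, (Int.toNat_of_nonneg h0).symm⟩
  have hk60 : k < 60 := by omega
  rw [hm, hk]
  exact pv_core k hk60
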